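/-
  W1 – W3 OF INVARIANTS §3.7: THE FRAME WINDOWS, and the index arithmetic of `vorbis_finish_frame`.

      HD3v b0 b1            the ARITHMETIC consequences of HD3 that every lemma here uses: `64 ≤ b0 ≤ b1 ≤ 8192`, both multiples of 64
                            (`HD3v.of_pow`: from `b0 = 2^a`, `b1 = 2^b`, `6 ≤ a ≤ b ≤ 13`)
      W1 mem f              `0 ≤ discard_samples_deferred ≤ (b1 − b0) / 4`                                    FIELD of `*f`
                            `W1.wins`, `W1.transfer` (two addresses), `.frame` (`ObjSame`), `.moves`, `.carries`, `.site`
      W2 b0 b1 n ls le rs re   the EXACT value set of vorbis_decode_initial's four window outputs            pure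
      Discard …             what lines 3409–3428 of vorbis_decode_packet_rest do to `(discard_samples_deferred, left_start)`
      Discard.sound         … keeps W1 and gives `0 ≤ left ≤ b1 / 2`, `ls ≤ left ≤ rs`  — from W1 ALONE (DECISIONS D-7)
      trunc_len             the uint32 analysis of the short final frame (lines 3445–3452): `current_end − current_loc < right_end − left`
      W3 b1 n left right len re   after a successful vorbis_decode_packet                                     pure
      W3.of_tail            W3 from W1, W2, `Discard`, and the two ways `*len` is set
      FinishPre b1 len left right   = W3′, the precondition of vorbis_finish_frame in CONTRACTS.md (`W3.finishPre`)
      FinishPre.mix_chan / mix_prev / mix_win / save_read / save_write     THE FOUR INDEX BOUNDS of vorbis_finish_frame (+ the window's)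
      FinishPre.prev_len    M7 again: `−b1 ≤ len − right ≤ b1 / 2`            FinishPre.result   `0 ≤ r`, `left + r ≤ right ≤ b1`
      W3At mem f pLen pLeft pRight   W3′ about the three `int` locals of the caller's protected frame (what get_frame_float and
                            vorbis_pump_first_frame hold between their two calls)

  I5's M8 (second half) and M8b are NOT here: DECISIONS D-7 — `left ≤ b1 / 2` needs W1 only (`Discard.sound`), and then
  `left + previous_length ≤ b1 / 2 + b1 / 2` (`FinishPre.mix_chan`).

  All values are `Int` (C `int`s); `/` is by a numeral, so `omega` decides every goal once the hypotheses are in the context.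
-/
import Vorbis.State.Copied
namespace Vorbis
open X86 X86.User Asan

/-! ### The block sizes, as arithmetic -/

/-- **What the window arithmetic uses of HD3** (`blocksize_0 = 2^a`, `blocksize_1 = 2^b`, `6 ≤ a ≤ b ≤ 13`): ranges and
divisibility. With it every `/ 2`, `/ 4` below is exact. -/
structure HD3v (b0 b1 : Int) : Prop where
  lo : 64 ≤ b0
  le : b0 ≤ b1
  hi : b1 ≤ 8192
  div0 : b0 % 64 = 0
  div1 : b1 % 64 = 0

/-- A power of two from `2^6` up is a multiple of 64 and at least 64. -/
theorem pow2_ge6 (a : Nat) (ha : 6 ≤ a) : 64 ≤ 2 ^ a ∧ 2 ^ a % 64 = 0 := by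
  have e : 2 ^ a = 2 ^ (a - 6) * 64 := by
    have : a = (a - 6) + 6 := by omega
    rw [this, Nat.pow_add]
    simp only [Nat.add_sub_cancel]
  have hpos : 1 ≤ 2 ^ (a - 6) := Nat.one_le_two_pow
  constructor
  · rw [e]
    omega
  · rw [e]
    exact Nat.mul_mod_left _ _

/-- HD3 in its stated form gives `HD3v`. -/
theorem HD3v.of_pow (b0 b1 : Int) (a b : Nat) (h0 : b0 = ((2 ^ a : Nat) : Int)) (h1 : b1 = ((2 ^ b : Nat) : Int))
    (ha : 6 ≤ a) (hab : a ≤ b) (hb : b ≤ 13) : HD3v b0 b1 := by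
  have ga := pow2_ge6 a ha
  have gb := pow2_ge6 b (by omega)
  have hle : 2 ^ a ≤ 2 ^ b := Nat.pow_le_pow_right (by decide) hab
  have hhi : 2 ^ b ≤ 2 ^ 13 := Nat.pow_le_pow_right (by decide) hb
  have e13 : 2 ^ 13 = 8192 := by decide
  subst h0
  subst h1
  constructor <;> omega

/-! ### W1 -/

/-- **W1**: `0 ≤ discard_samples_deferred ≤ (blocksize_1 − blocksize_0) / 4`. Established by vorbis_init's memset (0); set once
(first decoded frame) to `n − right_end ∈ {0, (b1 − b0) / 4}`; afterwards only decreased under `≥`, or zeroed (`Discard.sound`). -/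
structure W1 (mem : Mem) (f : Nat) : Prop where
  nonneg : 0 ≤ stb_vorbis.discard_samples_deferred mem f
  le : stb_vorbis.discard_samples_deferred mem f ≤ (stb_vorbis.blocksize_1 mem f - stb_vorbis.blocksize_0 mem f) / 4

/-- W1 from the memset value, given `b0 ≤ b1`. -/
theorem W1.of_zero {mem : Mem} {f : Nat} (h0 : stb_vorbis.discard_samples_deferred mem f = 0)
    (hb : stb_vorbis.blocksize_0 mem f ≤ stb_vorbis.blocksize_1 mem f) : W1 mem f := by
  constructor
  · omega
  · omega

/-- The windows of `*f` that W1 reads: `blocksize_0`, `blocksize_1`; `discard_samples_deferred`. -/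
def W1.wins : Wins := [(152, 160), (1784, 1788)]

/-- The windows are the three fields. -/
example : W1.wins = [(Off.stb_vorbis.blocksize_0, Off.stb_vorbis.blocksize_1 + 4),
    (Off.stb_vorbis.discard_samples_deferred, Off.stb_vorbis.discard_samples_deferred + 4)] := by
  simp only [voff, W1.wins]

/-- **THE TWO-ADDRESS LEMMA of W1**: the three fields of `(mem', f)` have the values of those of `(mem, p)`. (The pattern of
every FIELD clause: unfold the accessors, rewrite each read.) -/
theorem W1.transfer {mem mem' : Mem} {p f : Nat} (h : W1 mem p) (he : ObjEq W1.wins mem p mem' f) : W1 mem' f := by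
  obtain ⟨h1, h2⟩ := h
  simp only [vacc, voff] at h1 h2
  constructor
  · simp only [vacc, voff]
    rw [he.i32 1784 (by decide)]
    exact h1
  · simp only [vacc, voff]
    rw [he.i32 1784 (by decide), he.i32 156 (by decide), he.i32 152 (by decide)]
    exact h2

/-- **FRAME**: W1 reads three fields of `*f`, none of them an arena offset. (NOT a decode-time frame: `discard_samples_deferred`
is one of the holes of `DecodeSame`; vorbis_decode_packet_rest re-establishes W1 by `Discard.sound`.) -/
theorem W1.frame {mem mem' : Mem} {f : Nat} (h : W1 mem f) (hs : ObjSame f mem mem') : W1 mem' f :=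
  h.transfer (hs.sub (by decide))

/-- W1 follows the object through `*f = p`. -/
theorem W1.moves : Group.Moves (fun _ mem f => W1 mem f) :=
  fun _ _ _ _ _ _ hm h => h.transfer (hm.objEq (by decide))

/-- W1 has the coarse frame: its three fields lie in the object, which is an allocated block and kept. -/
theorem W1.carries {Blk : Block → Prop} {mem mem' : Mem} {f : Nat} (h : W1 mem f) (hob : Blk (objBlock f))
    (ha : AllKept Blk mem mem') : W1 mem' f := by
  have hk := ha _ hob
  exact h.transfer (ObjEq.of_same hk.same hk.inside (by decide))

/-- The check site of `f->discard_samples_deferred` (vorbis_decode_packet_rest's tail). -/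
theorem W1.site {Blk : Block → Prop} {Live : Nat → Prop} {f a : Nat} (hob : OB1 Blk f) (hL : BlkLive Blk Live)
    (ha : a = f + Off.stb_vorbis.discard_samples_deferred) : Site Live a 4 :=
  hob.site hL _ 4 (by simp only [voff]; omega) (by omega) ha

/-! ### W2: the outputs of vorbis_decode_initial -/

/-- **W2**: the window of the decoded mode, `n` its block size. Short block: `(0, n/2, n/2, n)`. Long block: the left half is
`(0, n/2)` if the previous block was long, else `((n − b0)/4, (n + b0)/4)`; the right half `(n/2, n)` or
`((3n − b0)/4, (3n + b0)/4)` likewise. The exact value set, not only the inequalities: W3 needs it. -/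
structure W2 (b0 b1 n ls le rs re : Int) : Prop where
  size : n = b0 ∨ n = b1
  left : (ls = 0 ∧ le = n / 2) ∨ (n = b1 ∧ ls = (n - b0) / 4 ∧ le = (n + b0) / 4)
  right : (rs = n / 2 ∧ re = n) ∨ (n = b1 ∧ rs = (3 * n - b0) / 4 ∧ re = (3 * n + b0) / 4)

/-- The inequalities of W2 as INVARIANTS states them, and the three derived facts the tail of vorbis_decode_packet_rest uses. -/
theorem W2.bounds {b0 b1 n ls le rs re : Int} (hb : HD3v b0 b1) (h : W2 b0 b1 n ls le rs re) :
    0 ≤ ls ∧ ls ≤ le ∧ le ≤ n / 2 ∧ n / 2 ≤ rs ∧ rs ≤ re ∧ re ≤ n ∧ n ≤ b1 ∧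
      ls ≤ (b1 - b0) / 4 ∧ re - rs ≤ b1 / 2 ∧ b0 / 2 ≤ rs - ls := by
  obtain ⟨h1, h2, h3, h4, h5⟩ := hb
  obtain ⟨hn, hl, hr⟩ := h
  rcases hn with hn | hn <;> rcases hl with hl | hl <;> rcases hr with hr | hr <;> omega

/-- A short block's window. -/
theorem W2.short (b0 b1 : Int) : W2 b0 b1 b0 0 (b0 / 2) (b0 / 2) b0 :=
  ⟨Or.inl rfl, Or.inl ⟨rfl, rfl⟩, Or.inl ⟨rfl, rfl⟩⟩

/-- A long block's window; `prev`, `next` = the neighbouring blocks are long too. -/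
theorem W2.long (b0 b1 : Int) (prev next : Bool) :
    W2 b0 b1 b1 (if prev then 0 else (b1 - b0) / 4) (if prev then b1 / 2 else (b1 + b0) / 4)
      (if next then b1 / 2 else (3 * b1 - b0) / 4) (if next then b1 else (3 * b1 + b0) / 4) := by
  refine ⟨Or.inr rfl, ?_, ?_⟩
  · cases prev
    · exact Or.inr ⟨rfl, rfl, rfl⟩
    · exact Or.inl ⟨rfl, rfl⟩
  · cases next
    · exact Or.inr ⟨rfl, rfl, rfl⟩
    · exact Or.inl ⟨rfl, rfl⟩

/-! ### The discard arm (stb_vorbis_fixed.c 3409–3428) -/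

/-- **What lines 3409–3428 do to `d = discard_samples_deferred` and to `left_start`**: `first = f->first_decode`. The result is
the new `d'` and the value `left` that `*p_left` holds afterwards (`*p_left` is written only in the two middle arms; in the
other two it still holds `ls`: DECISIONS D-14). -/
inductive Discard (n ls rs re : Int) : Bool → Int → Int → Int → Prop where
  /-- the first decoded frame: `d := n − right_end` -/
  | first (d : Int) : Discard n ls rs re true d (n - re) ls
  /-- `d ≠ 0` and the whole window is discarded: `d −= right_start − left_start; left_start = right_start` -/
  | all (d : Int) (hd : d ≠ 0) (h : rs - ls ≤ d) : Discard n ls rs re false d (d - (rs - ls)) rs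
  /-- `d ≠ 0` and part of the window is discarded: `left_start += d; d = 0` -/
  | part (d : Int) (hd : d ≠ 0) (h : d < rs - ls) : Discard n ls rs re false d 0 (ls + d)
  /-- `d = 0`: nothing -/
  | none : Discard n ls rs re false 0 0 ls

/-- **D-7: W1 is kept, and `left ≤ b1 / 2` follows from W1 alone.** The arm `left := right_start` needs `d ≥ rs − ls`, which is
impossible for a long block (`d ≤ (b1 − b0)/4 < (b1 + b0)/4 ≤ rs − ls`); for a short one `left = b0 / 2`; otherwise
`left = ls + d ≤ (b1 − b0) / 2`. -/
theorem Discard.sound {b0 b1 n ls le rs re d d' left : Int} {first : Bool} (hb : HD3v b0 b1)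
    (hw : W2 b0 b1 n ls le rs re) (h0 : 0 ≤ d) (h1 : d ≤ (b1 - b0) / 4) (h : Discard n ls rs re first d d' left) :
    (0 ≤ d' ∧ d' ≤ (b1 - b0) / 4) ∧ (ls ≤ left ∧ left ≤ rs) ∧ (0 ≤ left ∧ left ≤ b1 / 2) := by
  obtain ⟨g1, g2, g3, g4, g5⟩ := hb
  obtain ⟨hn, hl, hr⟩ := hw
  cases h with
  | first =>
    rcases hn with hn | hn <;> rcases hl with hl | hl <;> rcases hr with hr | hr <;> omega
  | all hd hge =>
    rcases hn with hn | hn <;> rcases hl with hl | hl <;> rcases hr with hr | hr <;> omega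
  | part hd hlt =>
    rcases hn with hn | hn <;> rcases hl with hl | hl <;> rcases hr with hr | hr <;> omega
  | none =>
    rcases hn with hn | hn <;> rcases hl with hl | hl <;> rcases hr with hr | hr <;> omega

/-! ### The short final frame (3441–3452) -/

/-- **The uint32 analysis of `current_end < f->current_loc + (right_end − left_start)`**: `cl = current_loc`, `ce = current_end`,
`k = right_end − left_start` (`0 ≤ k ≤ 8192`). If the test holds in 32-bit arithmetic and `ce ≥ cl` (the `else` arm), the sum did
not wrap, so `ce − cl < k`: the value assigned to the `int *len` is in `[0, k)`, never negative. -/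
theorem trunc_len (cl ce k : Nat) (hcl : cl < 2 ^ 32) (hce : ce < 2 ^ 32) (hk : k ≤ 8192)
    (htest : ce < (cl + k) % 2 ^ 32) (hge : cl ≤ ce) : ce - cl < k := by
  omega

/-- **How `*len` is set**: the whole window (`right_end`, line 3470), or the truncated last frame (3445–3452):
`(ce < cl ? 0 : ce − cl) + left`, clamped to `right_end`. -/
inductive LenSet (left re : Int) : Int → Prop where
  /-- `*len = right_end` -/
  | full : LenSet left re re
  /-- the short final frame; `x = 0` or `x = current_end − current_loc` with `0 ≤ x` by `trunc_len` -/
  | trunc (x : Int) (hx : 0 ≤ x) : LenSet left re (if x + left > re then re else x + left)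

/-- `left ≤ len ≤ right_end` whichever way `*len` was set. -/
theorem LenSet.bounds {left re len : Int} (hle : left ≤ re) (h : LenSet left re len) : left ≤ len ∧ len ≤ re := by
  cases h with
  | full => omega
  | trunc x hx =>
    split <;> omega

/-! ### W3 -/

/-- **W3**: what holds of `(left, right, len)` after a successful vorbis_decode_packet; `re = right_end`, `n` the block size of
the decoded mode (both internal to vorbis_decode_packet: existentially quantified where the caller states W3). `right_le` (`right ≤ right_end`)
is part of W3 (design/INVARIANTS-errata.md, E-1: it is `right = right_start ≤ right_end` of W2, and W3′ of vorbis_finish_frame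
needs it). -/
structure W3 (b1 n left right len re : Int) : Prop where
  left_nonneg : 0 ≤ left
  left_half : left ≤ b1 / 2
  left_right : left ≤ right
  left_len : left ≤ len
  len_re : len ≤ re
  right_le : right ≤ re
  re_n : re ≤ n
  n_b1 : n ≤ b1
  overlap : re - right ≤ b1 / 2

/-- **W3 from the tail of vorbis_decode_packet_rest**: W1 at entry, W2 of the mode, the discard arm, the way `*len` was set;
`right` is `right_start`, never modified. -/
theorem W3.of_tail {b0 b1 n ls le rs re d d' left len : Int} {first : Bool} (hb : HD3v b0 b1)
    (hw : W2 b0 b1 n ls le rs re) (h0 : 0 ≤ d) (h1 : d ≤ (b1 - b0) / 4) (hd : Discard n ls rs re first d d' left)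
    (hl : LenSet left re len) : W3 b1 n left rs len re := by
  have hs := hd.sound hb hw h0 h1
  have hwb := hw.bounds hb
  have hlen := hl.bounds (by omega)
  constructor <;> omega

/-- **W3′: the precondition of vorbis_finish_frame** as CONTRACTS.md states it (DECISIONS D-7). -/
structure FinishPre (b1 len left right : Int) : Prop where
  left_nonneg : 0 ≤ left
  left_half : left ≤ b1 / 2
  left_right : left ≤ right
  left_len : left ≤ len
  len_b1 : len ≤ b1
  overlap : len - right ≤ b1 / 2
  right_b1 : right ≤ b1

/-- W3 gives W3′. -/
theorem W3.finishPre {b1 n left right len re : Int} (h : W3 b1 n left right len re) : FinishPre b1 len left right := by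
  obtain ⟨h1, h2, h3, h4, h5, h6, h7, h8, h9⟩ := h
  constructor <;> omega

namespace FinishPre
variable {b1 len left right : Int}

/-- `right` is non-negative too. -/
theorem right_nonneg (h : FinishPre b1 len left right) : 0 ≤ right := by
  have := h.left_nonneg
  have := h.left_right
  omega

/-- **Index bound 1, the mixing loop (3500): `channel_buffers[i][left + j]`**, `j < pl = previous_length ≤ b1 / 2` (get_window
returned non-NULL, so `2·pl ∈ {b0, b1}`): the float lies in the `4·b1` bytes of the channel buffer (M6). -/
theorem mix_chan (h : FinishPre b1 len left right) {pl j : Int} (hpl : pl ≤ b1 / 2) (hj0 : 0 ≤ j) (hj : j < pl) :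
    0 ≤ left + j ∧ 4 * (left + j) + 4 ≤ 4 * b1 := by
  have := h.left_nonneg
  have := h.left_half
  omega

/-- **Index bound 2, the mixing loop: `previous_window[i][j]`**, `j < pl ≤ b1 / 2`: inside the `2·b1` bytes (M6). -/
theorem mix_prev {b1 pl j : Int} (hpl : pl ≤ b1 / 2) (hj0 : 0 ≤ j) (hj : j < pl) : 0 ≤ j ∧ 4 * j + 4 ≤ 2 * b1 := by
  omega

/-- **The window reads of the mixing loop: `w[j]` and `w[n − 1 − j]`**, `w = window[k]` a block of `2·bk` bytes (M3), `n = pl`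
with `2·pl = bk`. -/
theorem mix_win {bk pl j : Int} (hpl : 2 * pl = bk) (hj0 : 0 ≤ j) (hj : j < pl) :
    (0 ≤ j ∧ 4 * j + 4 ≤ 2 * bk) ∧ (0 ≤ pl - 1 - j ∧ 4 * (pl - 1 - j) + 4 ≤ 2 * bk) := by
  omega

/-- **Index bound 3, the saving loop (3519): read `channel_buffers[i][right + j]`** under the loop test `right + j < len`. -/
theorem save_read (h : FinishPre b1 len left right) {j : Int} (hj0 : 0 ≤ j) (hj : right + j < len) :
    0 ≤ right + j ∧ 4 * (right + j) + 4 ≤ 4 * b1 := by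
  have := h.right_nonneg
  have := h.len_b1
  omega

/-- **Index bound 4, the saving loop: write `previous_window[i][j]`**, `j < len − right ≤ b1 / 2`. -/
theorem save_write (h : FinishPre b1 len left right) {j : Int} (hj0 : 0 ≤ j) (hj : right + j < len) :
    0 ≤ j ∧ 4 * j + 4 ≤ 2 * b1 := by
  have := h.overlap
  omega

/-- **M7 again**: the new `previous_length = len − right` is in `[−b1, b1 / 2]`. -/
theorem prev_len (h : FinishPre b1 len left right) : -b1 ≤ len - right ∧ len - right ≤ b1 / 2 := by
  have := h.left_nonneg
  have := h.left_len
  have := h.right_b1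
  have := h.overlap
  omega

/-- **The result** `r = min(right, len) − left` (line 3530: `if (len < right) right = len`): `0 ≤ r`, `left + r ≤ right ≤ b1`
(what stb_vorbis_get_frame_float's post and copy_frame's pre rest on). -/
theorem result (h : FinishPre b1 len left right) :
    0 ≤ (if len < right then len else right) - left ∧
      left + ((if len < right then len else right) - left) ≤ right ∧ right ≤ b1 := by
  have := h.left_right
  have := h.left_len
  have := h.right_b1
  split <;> omega

end FinishPre

/-! ### W3 in memory: the three locals of the caller -/

/-- **W3′ about the three `int` locals `len`, `left`, `right`** of stb_vorbis_get_frame_float / vorbis_pump_first_frame (objects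
of their protected frames, at `base + 32`, `base + 64`, `base + 48`), between the return of vorbis_decode_packet and the call
of vorbis_finish_frame. -/
def W3At (mem : Mem) (f pLen pLeft pRight : Nat) : Prop :=
  FinishPre (stb_vorbis.blocksize_1 mem f) (mem.i32 pLen) (mem.i32 pLeft) (mem.i32 pRight)

/-- **FRAME** of `W3At`: `blocksize_1` and the three locals read the same. -/
theorem W3At.frame {mem mem' : Mem} {f pLen pLeft pRight : Nat} (h : W3At mem f pLen pLeft pRight)
    (hs : ObjSame f mem mem') (e1 : mem'.i32 pLen = mem.i32 pLen)
    (e2 : mem'.i32 pLeft = mem.i32 pLeft) (e3 : mem'.i32 pRight = mem.i32 pRight) : W3At mem' f pLen pLeft pRight := by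
  unfold W3At at *
  simp only [vacc, voff] at h ⊢
  rw [hs.i32 156 (by decide), e1, e2, e3]
  exact h

/-- The same over decode-time stores (`blocksize_1` is not one of the holes). -/
theorem W3At.frame_decode {mem mem' : Mem} {f pLen pLeft pRight : Nat} (h : W3At mem f pLen pLeft pRight)
    (hs : DecodeSame f mem mem') (e1 : mem'.i32 pLen = mem.i32 pLen)
    (e2 : mem'.i32 pLeft = mem.i32 pLeft) (e3 : mem'.i32 pRight = mem.i32 pRight) : W3At mem' f pLen pLeft pRight := by
  unfold W3At at *
  simp only [vacc, voff] at h ⊢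
  rw [hs.i32 156 (by decide), e1, e2, e3]
  exact h

end Vorbis
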